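-- pv_equiv track=rewrite | github.com/christianebacani/Roadmap | Coding Challenges using Python and SQL/Code Wars Python Solved Problems/7 Kyu/sort_out_the_men_from_boys.py | men_from_boys
-- ===== SOURCE A (Python) =====
-- def men_from_boys(arr: list[int]) -> list[int]:
--     even_numbers = []
--     odd_numbers = []
--
--     for i in range(len(arr)):
--         if arr[i] % 2 == 0:
--             even_numbers.append(arr[i])
--
--         else:
--             odd_numbers.append(arr[i])
--
--     result = []
--     result.extend(sorted(list(set(even_numbers))))
--     result.extend(sorted(list(set(odd_numbers)), reverse=True))
--
--     return result
-- ===== SOURCE B (Python) =====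
-- def _insert_asc(lst, x):
--     # bisect_left-style binary search, then positional insert, skipping duplicates
--     lo, hi = 0, len(lst)
--     while lo < hi:
--         mid = (lo + hi) // 2
--         if lst[mid] < x:
--             lo = mid + 1
--         else:
--             hi = mid
--     if lo < len(lst) and lst[lo] == x:
--         return
--     lst.insert(lo, x)
--
--
-- def _insert_desc(lst, x):
--     # same, on a descending list
--     lo, hi = 0, len(lst)
--     while lo < hi:
--         mid = (lo + hi) // 2
--         if lst[mid] > x:
--             lo = mid + 1
--         else:
--             hi = mid
--     if lo < len(lst) and lst[lo] == x:
--         return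
--     lst.insert(lo, x)
--
--
-- def men_from_boys(arr: list[int]) -> list[int]:
--     evens = []
--     odds = []
--     for x in arr:
--         if x % 2 == 0:
--             _insert_asc(evens, x)
--         else:
--             _insert_desc(odds, x)
--     return evens + odds
-- ===== Notes on version B (the rewrite author's own statement) =====
-- stated objective: alternative
-- what changed: B never calls sorted() or builds a set: it makes one pass over the input, maintaining two duplicate-free ordered lists online by binary-search positional insertion (evens ascending, odds descending), and concatenates them; A partitions first and then dedups-and-sorts each half with set()+sorted().
import Mathlib
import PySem

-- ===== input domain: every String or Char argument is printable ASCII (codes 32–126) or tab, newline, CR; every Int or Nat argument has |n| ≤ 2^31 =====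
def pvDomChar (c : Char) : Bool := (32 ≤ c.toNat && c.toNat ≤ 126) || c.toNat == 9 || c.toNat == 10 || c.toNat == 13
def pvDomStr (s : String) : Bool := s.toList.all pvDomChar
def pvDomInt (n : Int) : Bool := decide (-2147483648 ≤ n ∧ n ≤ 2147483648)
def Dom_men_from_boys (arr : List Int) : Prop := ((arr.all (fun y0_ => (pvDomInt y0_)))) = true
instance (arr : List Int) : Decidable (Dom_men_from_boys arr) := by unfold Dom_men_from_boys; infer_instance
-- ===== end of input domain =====

-- B replaces A's partition-then-set()+sorted() with a single pass that maintains two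
-- duplicate-free ordered lists online by binary-search positional insertion (objective: alternative).

-- ===== PORT A =====
def men_from_boys (arr : List Int) : List Int :=
  let st := (PySem.List.pyRange 0 (arr.length : Int) 1).foldl
    (fun (st : List Int × List Int) i =>
      if PySem.Int.mod (PySem.List.pyGetD arr i 0) 2 = 0 then
        (st.1 ++ [PySem.List.pyGetD arr i 0], st.2)
      else
        (st.1, st.2 ++ [PySem.List.pyGetD arr i 0]))
    ([], [])
  ([] ++ PySem.List.sorted (PySem.Set.ofList st.1) (fun x => x) false)
     ++ PySem.List.sorted (PySem.Set.ofList st.2) (fun x => x) true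

-- ===== PORT B =====
-- _insert_asc: Source B's hand-written while loop is exactly CPython's bisect_left,
-- so the search is ported as the prelude primitive PySem.List.bisectLeft;
-- lst[lo] is read with getD at an in-range index (lo < len), where getD is exact.
def insertAsc (lst : List Int) (x : Int) : List Int :=
  let lo := PySem.List.bisectLeft lst x
  if lo < lst.length ∧ lst.getD lo 0 = x then lst
  else PySem.List.insert lst (lo : Int) x

-- the while loop of _insert_desc (same bisect loop with the comparison lst[mid] > x),
-- ported step for step with fuel (the loop always terminates: hi - lo shrinks; fuel = len suffices);
-- lst[mid] is read with getD at an in-range index (lo ≤ mid < hi ≤ len), where getD is exact,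
-- and (lo+hi)//2 on the nonnegative lo, hi is Nat division.
def bisectDescLoop (lst : List Int) (x : Int) : Nat → Nat → Nat → Nat
  | 0, lo, _hi => lo
  | fuel+1, lo, hi =>
    if lo < hi then
      if lst.getD ((lo + hi) / 2) 0 > x then bisectDescLoop lst x fuel ((lo + hi) / 2 + 1) hi
      else bisectDescLoop lst x fuel lo ((lo + hi) / 2)
    else lo

-- _insert_desc
def insertDesc (lst : List Int) (x : Int) : List Int :=
  let lo := bisectDescLoop lst x lst.length 0 lst.length
  if lo < lst.length ∧ lst.getD lo 0 = x then lst
  else PySem.List.insert lst (lo : Int) x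

def men_from_boys_alt (arr : List Int) : List Int :=
  let st := arr.foldl
    (fun (st : List Int × List Int) x =>
      if PySem.Int.mod x 2 = 0 then (insertAsc st.1 x, st.2)
      else (st.1, insertDesc st.2 x))
    ([], [])
  st.1 ++ st.2

-- ===== PRECONDITION & SPEC =====
def Spec_men_from_boys (arr : List Int) (out : List Int) : Prop := out = men_from_boys_alt arr
instance (arr : List Int) (out : List Int) : Decidable (Spec_men_from_boys arr out) := by unfold Spec_men_from_boys; infer_instance

-- ===== CLAIM (what is proved, stated in full; the proofs are below) =====
def Claim_equal_men_from_boys : Prop := ∀ (arr : List Int), Dom_men_from_boys arr → Spec_men_from_boys arr (men_from_boys arr)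

-- ===== LEMMAS AND PROOFS =====

-- A's index loop is a fold over the list itself
theorem men_from_boys_fold_eq (arr : List Int) :
    (PySem.List.pyRange 0 (arr.length : Int) 1).foldl
      (fun (st : List Int × List Int) i =>
        if PySem.Int.mod (PySem.List.pyGetD arr i 0) 2 = 0 then
          (st.1 ++ [PySem.List.pyGetD arr i 0], st.2)
        else
          (st.1, st.2 ++ [PySem.List.pyGetD arr i 0]))
      ([], []) =
    arr.foldl
      (fun (st : List Int × List Int) x =>
        if PySem.Int.mod x 2 = 0 then (st.1 ++ [x], st.2) else (st.1, st.2 ++ [x]))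
      ([], []) := by
  exact PySem.List.foldl_pyRange_zero_pyGetD arr 0
    (fun st x => if PySem.Int.mod x 2 = 0 then (st.1 ++ [x], st.2) else (st.1, st.2 ++ [x])) ([], [])

-- A's fold partitions the list
theorem fold_partition (arr : List Int) (a b : List Int) :
    arr.foldl
      (fun (st : List Int × List Int) x =>
        if PySem.Int.mod x 2 = 0 then (st.1 ++ [x], st.2) else (st.1, st.2 ++ [x]))
      (a, b) =
    (a ++ arr.filter (fun x => PySem.Int.mod x 2 == 0),
     b ++ arr.filter (fun x => !(PySem.Int.mod x 2 == 0))) := by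
  induction arr generalizing a b with
  | nil => simp
  | cons x xs ih =>
    simp only [List.foldl_cons, List.filter_cons]
    have hm : PySem.Int.mod x 2 = x % 2 := PySem.Int.mod_eq_emod_of_pos (by norm_num)
    by_cases h : PySem.Int.mod x 2 = 0
    · have hb : (PySem.Int.mod x 2 == 0) = true := by rw [hm] at h ⊢; simp; omega
      rw [if_pos h, ih, hb]; simp
    · have hb : (PySem.Int.mod x 2 == 0) = false := by rw [hm] at h ⊢; simp; omega
      rw [if_neg h, ih, hb]; simp

-- insertion at a position r that separates the strictly smaller prefix from the strictly
-- larger suffix keeps a strictly increasing list strictly increasing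
theorem pairwise_lt_insert_at (lst : List Int) (x : Int) (r : Nat)
    (hsort : lst.Pairwise (· < ·)) (hr : r ≤ lst.length)
    (hlo : ∀ i (_ : i < lst.length), i < r → lst[i] < x)
    (hhi : ∀ j (_ : j < lst.length), r ≤ j → x < lst[j]) :
    (lst.take r ++ x :: lst.drop r).Pairwise (· < ·) := by
  have htk : ∀ a ∈ lst.take r, a < x := by
    intro a ha
    obtain ⟨i, hi, rfl⟩ := List.mem_iff_getElem.mp ha
    rw [List.getElem_take]
    exact hlo i (by simp at hi; omega) (by simp at hi; omega)
  have hdr : ∀ b ∈ lst.drop r, x < b := by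
    intro b hb
    obtain ⟨j, hj, rfl⟩ := List.mem_iff_getElem.mp hb
    rw [List.getElem_drop]
    exact hhi (r + j) (by simp at hj; omega) (by omega)
  rw [List.pairwise_append]
  refine ⟨List.Pairwise.sublist (List.take_sublist r lst) hsort, ?_, ?_⟩
  · rw [List.pairwise_cons]
    exact ⟨hdr, List.Pairwise.sublist (List.drop_sublist r lst) hsort⟩
  · intro a ha b hb
    rcases List.mem_cons.mp hb with rfl | hb'
    · exact htk a ha
    · exact lt_trans (htk a ha) (hdr b hb')

-- same for strictly decreasing lists
theorem pairwise_gt_insert_at (lst : List Int) (x : Int) (r : Nat)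
    (hsort : lst.Pairwise (· > ·)) (hr : r ≤ lst.length)
    (hlo : ∀ i (_ : i < lst.length), i < r → x < lst[i])
    (hhi : ∀ j (_ : j < lst.length), r ≤ j → lst[j] < x) :
    (lst.take r ++ x :: lst.drop r).Pairwise (· > ·) := by
  have htk : ∀ a ∈ lst.take r, x < a := by
    intro a ha
    obtain ⟨i, hi, rfl⟩ := List.mem_iff_getElem.mp ha
    rw [List.getElem_take]
    exact hlo i (by simp at hi; omega) (by simp at hi; omega)
  have hdr : ∀ b ∈ lst.drop r, b < x := by
    intro b hb
    obtain ⟨j, hj, rfl⟩ := List.mem_iff_getElem.mp hb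
    rw [List.getElem_drop]
    exact hhi (r + j) (by simp at hj; omega) (by omega)
  rw [List.pairwise_append]
  refine ⟨List.Pairwise.sublist (List.take_sublist r lst) hsort, ?_, ?_⟩
  · rw [List.pairwise_cons]
    exact ⟨hdr, List.Pairwise.sublist (List.drop_sublist r lst) hsort⟩
  · intro a ha b hb
    rcases List.mem_cons.mp hb with rfl | hb'
    · exact htk a ha
    · exact lt_trans (hdr b hb') (htk a ha)

theorem mem_insert_at (lst : List Int) (x a : Int) (r : Nat) :
    a ∈ lst.take r ++ x :: lst.drop r ↔ a = x ∨ a ∈ lst := by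
  have h : a ∈ lst ↔ a ∈ lst.take r ∨ a ∈ lst.drop r := by
    conv_lhs => rw [← List.take_append_drop r lst]
    exact List.mem_append
  simp only [List.mem_append, List.mem_cons, h]
  tauto

-- the descending bisect loop: invariant and final bracketing
theorem bisectDescLoop_spec (lst : List Int) (x : Int) (hsort : lst.Pairwise (· > ·)) :
    ∀ (fuel lo hi : Nat), lo ≤ hi → hi ≤ lst.length → hi - lo ≤ fuel →
      (∀ j (_ : j < lst.length), j < lo → x < lst[j]) →
      (∀ j (_ : j < lst.length), hi ≤ j → lst[j] ≤ x) →
      bisectDescLoop lst x fuel lo hi ≤ lst.length ∧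
      (∀ j (_ : j < lst.length), j < bisectDescLoop lst x fuel lo hi → x < lst[j]) ∧
      (∀ j (_ : j < lst.length), bisectDescLoop lst x fuel lo hi ≤ j → lst[j] ≤ x) := by
  have hg := List.pairwise_iff_getElem.mp hsort
  intro fuel
  induction fuel with
  | zero =>
    intro lo hi h1 h2 h3 hlo hhi
    have : lo = hi := by omega
    subst this
    rw [show bisectDescLoop lst x 0 lo lo = lo from rfl]
    exact ⟨by omega, fun j hj hjlo => hlo j hj hjlo, fun j hj hjlo => hhi j hj hjlo⟩
  | succ fuel ih =>
    intro lo hi h1 h2 h3 hlo hhi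
    by_cases hlt : lo < hi
    · have hmid1 : lo ≤ (lo + hi) / 2 := by omega
      have hmid2 : (lo + hi) / 2 < hi := by omega
      have hmlen : (lo + hi) / 2 < lst.length := by omega
      have hget : lst.getD ((lo + hi) / 2) 0 = lst[(lo + hi) / 2] :=
        List.getD_eq_getElem lst 0 hmlen
      have hstep : bisectDescLoop lst x (fuel+1) lo hi =
          if lo < hi then
            (if lst.getD ((lo + hi) / 2) 0 > x then bisectDescLoop lst x fuel ((lo + hi) / 2 + 1) hi
             else bisectDescLoop lst x fuel lo ((lo + hi) / 2))
          else lo := rfl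
      by_cases hc : lst.getD ((lo + hi) / 2) 0 > x
      · rw [hstep, if_pos hlt, if_pos hc]
        refine ih ((lo + hi) / 2 + 1) hi (by omega) h2 (by omega) ?_ hhi
        intro j hj hjlo
        rcases Nat.lt_succ_iff_lt_or_eq.mp hjlo with hjm | rfl
        · rcases Nat.lt_or_ge j lo with hl | hl
          · exact hlo j hj hl
          · exact lt_trans (by rw [hget] at hc; exact hc) (hg j ((lo+hi)/2) hj hmlen hjm)
        · rw [hget] at hc; exact hc
      · rw [hstep, if_pos hlt, if_neg hc]
        refine ih lo ((lo + hi) / 2) (by omega) (by omega) (by omega) hlo ?_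
        intro j hj hjlo
        rcases Nat.lt_or_ge j ((lo + hi) / 2) with hl | hl
        · omega
        · rcases Nat.eq_or_lt_of_le hl with rfl | hl'
          · rw [hget] at hc; omega
          · exact le_of_lt (lt_of_lt_of_le (hg ((lo+hi)/2) j hmlen hj hl') (by rw [hget] at hc; omega))
    · have : lo = hi := by omega
      subst this
      rw [show bisectDescLoop lst x (fuel+1) lo lo = lo by
        rw [show bisectDescLoop lst x (fuel+1) lo lo
            = if lo < lo then (if lst.getD ((lo + lo) / 2) 0 > x then bisectDescLoop lst x fuel ((lo + lo) / 2 + 1) lo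
               else bisectDescLoop lst x fuel lo ((lo + lo) / 2)) else lo from rfl, if_neg (by omega)]]
      exact ⟨by omega, fun j hj hjlo => hlo j hj hjlo, fun j hj hjlo => hhi j hj hjlo⟩

-- characterization of insertAsc on a strictly increasing list
theorem insertAsc_spec (lst : List Int) (x : Int) (hsort : lst.Pairwise (· < ·)) :
    (insertAsc lst x).Pairwise (· < ·) ∧ (∀ a, a ∈ insertAsc lst x ↔ a = x ∨ a ∈ lst) := by
  obtain ⟨hr, hlo, hhi⟩ := PySem.List.bisectLeft_spec lst x (hsort.imp fun h => le_of_lt h)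
  set r := PySem.List.bisectLeft lst x with hrdef
  unfold insertAsc
  rw [← hrdef]
  by_cases hfound : r < lst.length ∧ lst.getD r 0 = x
  · rw [if_pos hfound]
    have hx : x ∈ lst := by
      rw [← hfound.2, List.getD_eq_getElem lst 0 hfound.1]
      exact List.getElem_mem hfound.1
    exact ⟨hsort, fun a => by constructor
                              · tauto
                              · rintro (rfl | h) <;> [exact hx; exact h]⟩
  · rw [if_neg hfound, PySem.List.insert_natCast lst r x hr]
    have hg := List.pairwise_iff_getElem.mp hsort
    have hhi' : ∀ j (_ : j < lst.length), r ≤ j → x < lst[j] := by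
      intro j hj hrj
      by_cases hjr : r = j
      · subst hjr
        have hne : lst[r] ≠ x := by
          intro he
          exact hfound ⟨hj, by rw [List.getD_eq_getElem lst 0 hj]; exact he⟩
        exact lt_of_le_of_ne (hhi r hj le_rfl) (Ne.symm hne)
      · have hl : r < j := by omega
        have hrlen : r < lst.length := by omega
        exact lt_of_le_of_lt (hhi r hrlen le_rfl) (hg r j hrlen hj hl)
    exact ⟨pairwise_lt_insert_at lst x r hsort hr (fun i hi hir => hlo i hi hir) hhi',
           fun a => mem_insert_at lst x a r⟩

-- characterization of insertDesc on a strictly decreasing list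
theorem insertDesc_spec (lst : List Int) (x : Int) (hsort : lst.Pairwise (· > ·)) :
    (insertDesc lst x).Pairwise (· > ·) ∧ (∀ a, a ∈ insertDesc lst x ↔ a = x ∨ a ∈ lst) := by
  obtain ⟨hr, hlo, hhi⟩ := bisectDescLoop_spec lst x hsort lst.length 0 lst.length
    (by omega) le_rfl (by omega) (by omega) (fun j hj hjl => by omega)
  unfold insertDesc
  set r := bisectDescLoop lst x lst.length 0 lst.length with hrdef
  by_cases hfound : r < lst.length ∧ lst.getD r 0 = x
  · rw [if_pos hfound]
    have hx : x ∈ lst := by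
      rw [← hfound.2, List.getD_eq_getElem lst 0 hfound.1]
      exact List.getElem_mem hfound.1
    exact ⟨hsort, fun a => by constructor
                              · tauto
                              · rintro (rfl | h) <;> [exact hx; exact h]⟩
  · rw [if_neg hfound, PySem.List.insert_natCast lst r x hr]
    have hg := List.pairwise_iff_getElem.mp hsort
    have hhi' : ∀ j (_ : j < lst.length), r ≤ j → lst[j] < x := by
      intro j hj hrj
      by_cases hjr : r = j
      · subst hjr
        have hne : lst[r] ≠ x := by
          intro he
          exact hfound ⟨hj, by rw [List.getD_eq_getElem lst 0 hj]; exact he⟩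
        exact lt_of_le_of_ne (hhi r hj le_rfl) hne
      · have hl : r < j := by omega
        have hrlen : r < lst.length := by omega
        exact lt_of_lt_of_le (hg r j hrlen hj hl) (hhi r hrlen le_rfl)
    exact ⟨pairwise_gt_insert_at lst x r hsort hr (fun i hi hir => hlo i hi hir) hhi',
           fun a => mem_insert_at lst x a r⟩

-- the invariant of B's single pass
theorem foldB_inv (arr : List Int) (E O : List Int)
    (hE : E.Pairwise (· < ·)) (hO : O.Pairwise (· > ·)) :
    let r := arr.foldl
      (fun (st : List Int × List Int) x =>
        if PySem.Int.mod x 2 = 0 then (insertAsc st.1 x, st.2)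
        else (st.1, insertDesc st.2 x)) (E, O)
    r.1.Pairwise (· < ·) ∧ r.2.Pairwise (· > ·) ∧
    (∀ a, a ∈ r.1 ↔ a ∈ E ∨ a ∈ arr.filter (fun x => PySem.Int.mod x 2 == 0)) ∧
    (∀ a, a ∈ r.2 ↔ a ∈ O ∨ a ∈ arr.filter (fun x => !(PySem.Int.mod x 2 == 0))) := by
  induction arr generalizing E O with
  | nil => simp [hE, hO]
  | cons x xs ih =>
    simp only [List.foldl_cons, List.filter_cons]
    have hm : PySem.Int.mod x 2 = x % 2 := PySem.Int.mod_eq_emod_of_pos (by norm_num)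
    by_cases h : PySem.Int.mod x 2 = 0
    · have hb : (PySem.Int.mod x 2 == 0) = true := by rw [hm] at h ⊢; simp; omega
      rw [if_pos h, hb]
      obtain ⟨hA1, hA2⟩ := insertAsc_spec E x hE
      obtain ⟨p1, p2, p3, p4⟩ := ih (insertAsc E x) O hA1 hO
      refine ⟨p1, p2, fun a => ?_, fun a => by simpa using p4 a⟩
      rw [p3 a, hA2 a]
      simp; tauto
    · have hb : (PySem.Int.mod x 2 == 0) = false := by rw [hm] at h ⊢; simp; omega
      rw [if_neg h, hb]
      obtain ⟨hD1, hD2⟩ := insertDesc_spec O x hO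
      obtain ⟨p1, p2, p3, p4⟩ := ih E (insertDesc O x) hE hD1
      refine ⟨p1, p2, fun a => by simpa using p3 a, fun a => ?_⟩
      rw [p4 a, hD2 a]
      simp; tauto

theorem sorted_asc_eq (l ys : List Int) (hp : ys.Pairwise (· < ·))
    (hm : ∀ a, a ∈ ys ↔ a ∈ l) :
    PySem.List.sorted (PySem.Set.ofList l) (fun x => x) false = ys := by
  apply PySem.List.sorted_eq_of_perm_of_pairwise_lt
  · rw [List.perm_ext_iff_of_nodup (hp.imp fun h => LT.lt.ne h) (PySem.Set.nodup_ofList l)]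
    intro a; rw [hm a, PySem.Set.mem_ofList]
  · exact hp

theorem sorted_desc_eq (l ys : List Int) (hp : ys.Pairwise (· > ·))
    (hm : ∀ a, a ∈ ys ↔ a ∈ l) :
    PySem.List.sorted (PySem.Set.ofList l) (fun x => x) true = ys := by
  apply PySem.List.sorted_rev_eq_of_perm_of_pairwise_gt
  · rw [List.perm_ext_iff_of_nodup (hp.imp fun h => (LT.lt.ne h).symm) (PySem.Set.nodup_ofList l)]
    intro a; rw [hm a, PySem.Set.mem_ofList]
  · exact hp

-- ===== VERDICT (by name: the statement is the Claim_ definition above) =====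
theorem men_from_boys_spec : Claim_equal_men_from_boys := by
  intro arr _
  show men_from_boys arr = men_from_boys_alt arr
  unfold men_from_boys men_from_boys_alt
  rw [men_from_boys_fold_eq, fold_partition]
  obtain ⟨p1, p2, p3, p4⟩ := foldB_inv arr [] [] (by simp) (by simp)
  simp only [List.nil_append]
  rw [sorted_asc_eq _ _ p1 (fun a => by simpa using p3 a),
      sorted_desc_eq _ _ p2 (fun a => by simpa using p4 a)]
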